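-- pv_equiv track=rewrite | github.com/Gleb-hub/Architecture_labs | source/libs/boolean_logic_funcs/main.py | _gen_bin_col
-- ===== SOURCE A (Python) =====
-- def _gen_bin_col(vec_len, step):
--     res = []
--     curr = 0
--     for bit in range(vec_len):
--         if curr >= step:
--             res.append('1')
--             if curr == step * 2 - 1:
--                 curr = 0
--             else:
--                 curr += 1
--         else:
--             res.append('0')
--             curr += 1
--     return res
-- ===== SOURCE B (Python) =====
-- def _gen_bin_col(vec_len, step):
--     if step <= 0:
--         return ['1'] * vec_len
--     period = 2 * step
--     return ['0' if i % period < step else '1' for i in range(vec_len)]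
-- ===== Notes on version B (the rewrite author's own statement) =====
-- stated objective: simpler
-- what changed: Replaces A's running curr counter/state machine with a closed-form per-index formula i % (2*step) < step (step <= 0, where A's counter never resets, yields the same all-ones column directly).
import Mathlib
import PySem

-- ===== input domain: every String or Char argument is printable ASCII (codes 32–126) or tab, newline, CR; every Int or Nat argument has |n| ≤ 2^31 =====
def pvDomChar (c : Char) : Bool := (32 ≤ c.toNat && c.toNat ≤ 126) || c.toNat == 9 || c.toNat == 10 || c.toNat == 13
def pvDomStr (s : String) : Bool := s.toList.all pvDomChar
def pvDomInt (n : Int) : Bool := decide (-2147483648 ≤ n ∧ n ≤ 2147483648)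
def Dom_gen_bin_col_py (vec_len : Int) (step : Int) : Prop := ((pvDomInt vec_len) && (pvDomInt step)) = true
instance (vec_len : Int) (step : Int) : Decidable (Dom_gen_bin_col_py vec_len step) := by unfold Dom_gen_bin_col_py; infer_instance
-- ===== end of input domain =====

-- B drops A's running `curr` state machine for a closed-form per-index formula (objective: simpler).

-- ===== PORT A =====
-- loop body of A's for-loop: state is (res, curr)
def pvBodyA (step : Int) (st : List String × Int) (_bit : Int) : List String × Int :=
  if st.2 ≥ step then
    (st.1 ++ ["1"], if st.2 = step * 2 - 1 then 0 else st.2 + 1)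
  else
    (st.1 ++ ["0"], st.2 + 1)

def gen_bin_col_py (vec_len : Int) (step : Int) : List String :=
  ((PySem.List.pyRange 0 vec_len 1).foldl (pvBodyA step) ([], 0)).1

-- ===== PORT B =====
def gen_bin_col_py_alt (vec_len : Int) (step : Int) : List String :=
  if step ≤ 0 then
    List.replicate vec_len.toNat "1"
  else
    (PySem.List.pyRange 0 vec_len 1).map
      (fun i => if PySem.Int.mod i (2 * step) < step then "0" else "1")

-- ===== PRECONDITION & SPEC =====
def Spec_gen_bin_col_py (vec_len : Int) (step : Int) (out : List String) : Prop := out = gen_bin_col_py_alt vec_len step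
instance (vec_len : Int) (step : Int) (out : List String) : Decidable (Spec_gen_bin_col_py vec_len step out) := by unfold Spec_gen_bin_col_py; infer_instance

-- ===== CLAIM (what is proved, stated in full; the proofs are below) =====
def Claim_equal_gen_bin_col_py : Prop := ∀ (vec_len : Int) (step : Int), Dom_gen_bin_col_py vec_len step → Spec_gen_bin_col_py vec_len step (gen_bin_col_py vec_len step)

-- ===== LEMMAS AND PROOFS =====

-- when step ≤ 0 the counter never resets and every iteration appends '1'
lemma pvLoopA_le (step : Int) (h : step ≤ 0) (m : Nat) :
    List.foldl (pvBodyA step) ([], 0) (List.map (fun k : Nat => (0:Int) + (k:Int)) (List.range m))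
      = (List.replicate m "1", (m : Int)) := by
  induction m with
  | zero => simp
  | succ m ih =>
    rw [List.range_succ, List.map_append, List.foldl_append, ih]
    have h1 : ((m : Int) ≥ step) := by omega
    have h2 : ¬ ((m : Int) = step * 2 - 1) := by omega
    simp [pvBodyA, h1, h2, List.replicate_succ']

-- when 0 < step the counter after m iterations is m % (2*step) and the m-th
-- appended bit is '0' iff m % (2*step) < step
lemma pvLoopA_pos (step : Int) (h : 0 < step) (m : Nat) :
    List.foldl (pvBodyA step) ([], 0) (List.map (fun k : Nat => (0:Int) + (k:Int)) (List.range m))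
      = (List.map (fun k : Nat => if ((k : Int) % (2 * step)) < step then "0" else "1") (List.range m),
         (m : Int) % (2 * step)) := by
  induction m with
  | zero => simp
  | succ m ih =>
    rw [List.range_succ, List.map_append, List.foldl_append, ih, List.map_append]
    set c : Int := (m : Int) % (2 * step) with hc
    have hcb : 0 ≤ c ∧ c < 2 * step :=
      ⟨Int.emod_nonneg _ (by omega), Int.emod_lt_of_pos _ (by omega)⟩
    have hsucc : ((m : Int) + 1) % (2 * step) = if c = 2 * step - 1 then 0 else c + 1 := by
      rw [Int.add_emod, ← hc]
      have h1 : (1 : Int) % (2 * step) = 1 := Int.emod_eq_of_lt (by omega) (by omega)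
      rw [h1]
      by_cases hce : c = 2 * step - 1
      · simp [hce]
      · rw [Int.emod_eq_of_lt (by omega) (by omega)]; simp [hce]
    have hcast : ((m + 1 : Nat) : Int) = (m : Int) + 1 := by push_cast; ring
    simp only [List.map_cons, List.map_nil, List.foldl_cons, List.foldl_nil, pvBodyA, ge_iff_le]
    rw [hcast, hsucc, show step * 2 - 1 = 2 * step - 1 by ring]
    by_cases hcs : step ≤ c
    · rw [if_pos hcs, if_neg (show ¬ ((m : Int) % (2 * step) < step) from by rw [← hc]; omega)]
    · rw [if_neg hcs, if_pos (show ((m : Int) % (2 * step) < step) from by rw [← hc]; omega),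
          if_neg (show ¬ (c = 2 * step - 1) from by omega)]

-- ===== VERDICT (by name: the statement is the Claim_ definition above) =====
theorem gen_bin_col_py_spec : Claim_equal_gen_bin_col_py := by
  intro vec_len step _
  unfold Spec_gen_bin_col_py gen_bin_col_py gen_bin_col_py_alt
  rw [PySem.List.pyRange_one]
  by_cases hs : step ≤ 0
  · rw [pvLoopA_le step hs]
    simp [hs]
  · have hpos : 0 < step := by omega
    rw [pvLoopA_pos step hpos]
    rw [if_neg hs, List.map_map]
    apply List.map_congr_left
    intro k _
    simp [PySem.Int.mod_eq_emod_of_pos (show (0:Int) < 2 * step by omega)]
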